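-- pv_equiv track=rewrite | github.com/Firkraag/leetcode | maxProfit_123.py | computeRight
-- ===== SOURCE A (Python) =====
-- def computeRight(prices):
--     n = len(prices)
--     one = [0] * n
--     maximum = prices[-1]
--     for i in range(n - 2, -1, -1):
--         if maximum > prices[i]:
--             one[i] = max(one[i + 1], maximum - prices[i])
--         else:
--             maximum = prices[i]
--             one[i] = one[i + 1]
--     return one
-- ===== SOURCE B (Python) =====
-- def computeRight(prices):
--     rev = prices[::-1]
--     suff = []
--     m = None
--     for p in rev:
--         if m is None or p > m:
--             m = p
--         suff.append(m)
--     out = []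
--     best = 0
--     for p, s in zip(rev, suff):
--         gain = s - p
--         if gain > best:
--             best = gain
--         out.append(best)
--     out.reverse()
--     return out
-- ===== Notes on version B (the rewrite author's own statement) =====
-- stated objective: alternative
-- what changed: A is one fused backward index loop writing into a preallocated array with a branch that defers the max-update; B decomposes the task over the reversed list into three separate passes: build a running-maximum (suffix-max) table, accumulate a cumulative maximum of (suffMax - price) over the zipped lists, then reverse.
import Mathlib
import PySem

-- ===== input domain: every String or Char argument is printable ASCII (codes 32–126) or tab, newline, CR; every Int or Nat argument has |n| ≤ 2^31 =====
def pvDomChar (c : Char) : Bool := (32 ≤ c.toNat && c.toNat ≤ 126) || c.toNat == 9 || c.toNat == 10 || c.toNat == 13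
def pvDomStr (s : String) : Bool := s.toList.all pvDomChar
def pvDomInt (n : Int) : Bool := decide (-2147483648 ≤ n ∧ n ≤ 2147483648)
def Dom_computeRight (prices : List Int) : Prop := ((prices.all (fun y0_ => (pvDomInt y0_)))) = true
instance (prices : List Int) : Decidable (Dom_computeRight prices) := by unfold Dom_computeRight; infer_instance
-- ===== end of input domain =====

-- B replaces A's fused backward scan by a three-pass decomposition (suffix-max table, cumulative max of gains, reverse); same O(n) cost, return value proved equal on nonempty lists.


-- ===== PORT A =====
-- loop body of A: i runs n-2 .. 0; state = (one, maximum)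
def stepA (prices : List Int) (st : List Int × Int) (i : Int) : List Int × Int :=
  if st.2 > PySem.List.pyGetD prices i 0 then
    (PySem.List.pySetD st.1 i (max (PySem.List.pyGetD st.1 (i + 1) 0) (st.2 - PySem.List.pyGetD prices i 0)), st.2)
  else
    (PySem.List.pySetD st.1 i (PySem.List.pyGetD st.1 (i + 1) 0), PySem.List.pyGetD prices i 0)

def computeRight (prices : List Int) : List Int :=
  -- n = len(prices), inlined below
  match PySem.List.pyGet? prices (-1) with
  | none => []  -- reading the last element raises IndexError on the empty list; excluded by Pre_
  | some m0 =>
    ((PySem.List.pyRange ((prices.length : Int) - 2) (-1) (-1)).foldl (stepA prices)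
      (List.replicate prices.length 0, m0)).1

-- ===== PORT B =====
-- pass 1 of B: running maximum over the reversed list (m is None before the first element)
def stepS (st : List Int × Option Int) (p : Int) : List Int × Option Int :=
  let m : Int := match st.2 with
    | none => p
    | some m0 => if p > m0 then p else m0
  (st.1 ++ [m], some m)

-- pass 2 of B: cumulative maximum of gains s - p
def stepO (st : List Int × Int) (ps : Int × Int) : List Int × Int :=
  let gain := ps.2 - ps.1
  let best := if gain > st.2 then gain else st.2
  (st.1 ++ [best], best)

def computeRight_alt (prices : List Int) : List Int :=
  let rev := prices.reverse                  -- prices[::-1]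
  let suff := (rev.foldl stepS (([] : List Int), (none : Option Int))).1
  let out := ((rev.zip suff).foldl stepO (([] : List Int), (0 : Int))).1
  out.reverse

-- ===== PRECONDITION & SPEC =====
-- Pre_ excludes only the empty list, on which A raises IndexError when reading the last element.
def Pre_computeRight (prices : List Int) : Prop := prices ≠ []
instance (prices : List Int) : Decidable (Pre_computeRight prices) := by unfold Pre_computeRight; infer_instance
def pvWitness_computeRight : List Int := [1, 5, 3]

def Spec_computeRight (prices : List Int) (out : List Int) : Prop := out = computeRight_alt prices
instance (prices : List Int) (out : List Int) : Decidable (Spec_computeRight prices out) := by unfold Spec_computeRight; infer_instance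

-- ===== CLAIM (what is proved, stated in full; the proofs are below) =====
def Claim_equal_computeRight : Prop := ∀ (prices : List Int), Dom_computeRight prices → Pre_computeRight prices → Spec_computeRight prices (computeRight prices)

-- ===== LEMMAS AND PROOFS =====

-- reference recursion shared by both sides: processing the reversed tail with running max m and best so far
def refA (m best : Int) : List Int → List Int
  | [] => []
  | p :: t => if m > p then (max best (m - p)) :: refA m (max best (m - p)) t
              else best :: refA p best t

lemma refA_cons (m best p : Int) (t : List Int) :
    refA m best (p :: t) = if m > p then (max best (m - p)) :: refA m (max best (m - p)) t
      else best :: refA p best t := rfl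

-- suffix-max scan (pass 1 of B), after the first element fixed m
def suffL (m : Int) : List Int → List Int
  | [] => []
  | p :: t => (if p > m then p else m) :: suffL (if p > m then p else m) t

-- cumulative max of gains (pass 2 of B)
def outL (best : Int) : List (Int × Int) → List Int
  | [] => []
  | (p, s) :: t => (if s - p > best then s - p else best) :: outL (if s - p > best then s - p else best) t

lemma foldS_spec (t : List Int) : ∀ (acc : List Int) (m : Int),
    (t.foldl stepS (acc, some m)).1 = acc ++ suffL m t := by
  induction t with
  | nil => intro acc m; simp [suffL]
  | cons p t ih =>
    intro acc m
    simp only [List.foldl_cons, stepS, suffL, ih]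
    by_cases h : p > m <;> simp [h]

lemma foldO_spec (t : List (Int × Int)) : ∀ (acc : List Int) (best : Int),
    (t.foldl stepO (acc, best)).1 = acc ++ outL best t := by
  induction t with
  | nil => intro acc best; simp [outL]
  | cons ps t ih =>
    intro acc best
    obtain ⟨p, s⟩ := ps
    simp only [List.foldl_cons, stepO, outL, ih]
    by_cases h : s - p > best <;> simp [h]

lemma outL_zip_suffL (t : List Int) : ∀ (m best : Int), 0 ≤ best →
    outL best (t.zip (suffL m t)) = refA m best t := by
  induction t with
  | nil => intro m best _; simp [suffL, outL, refA]
  | cons p t ih =>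
    intro m best hb
    simp only [suffL, List.zip_cons_cons, outL, refA]
    by_cases h : m > p
    · have h2 : ¬ p > m := by omega
      simp only [h2, if_false, if_pos h]
      have hmax : (if m - p > best then m - p else best) = max best (m - p) := by omega
      rw [hmax, ih m (max best (m - p)) (by omega)]
    · have hp : (if p > m then p else m) = p := by omega
      have h0 : ¬ p - p > best := by omega
      simp only [hp, if_neg h, sub_self] at *
      have h0' : ¬ (0 : Int) > best := by omega
      simp only [h0', if_false]
      rw [ih p best hb]

lemma drop_set_cons : ∀ (l : List Int) (i : Nat) (v : Int), i < l.length →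
    (l.set i v).drop i = v :: l.drop (i + 1) := by
  intro l
  induction l with
  | nil => intro i v h; simp at h
  | cons x xs ih =>
    intro i v h
    cases i with
    | zero => simp
    | succ j =>
      simp only [List.set_cons_succ, List.drop_succ_cons]
      exact ih j v (by simpa using h)

lemma getD_set_self (l : List Int) (i : Nat) (v : Int) (h : i < l.length) :
    (l.set i v).getD i 0 = v := by simp [List.getD, h]

-- the main invariant of A's backward loop
lemma loopA_spec (prices : List Int) : ∀ (k : Nat) (one : List Int) (m : Int),
    one.length = prices.length → k + 1 < prices.length →
    ((PySem.List.pyRange (k : Int) (-1) (-1)).foldl (stepA prices) (one, m)).1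
      = (refA m (one.getD (k + 1) 0) ((prices.take (k + 1)).reverse)).reverse ++ one.drop (k + 1) := by
  intro k
  induction k with
  | zero =>
    intro one m hlen hk
    rw [PySem.List.pyRange_neg_one_cons (by omega), PySem.List.pyRange_neg_one_eq_nil (by omega)]
    simp only [List.foldl_cons, List.foldl_nil, stepA, Nat.cast_zero, zero_add]
    have hp0 : PySem.List.pyGetD prices (0 : Int) 0 = prices.getD 0 0 := by
      simpa using PySem.List.pyGetD_natCast (xs := prices) (n := 0) (d := 0)
    have hone1 : PySem.List.pyGetD one (1 : Int) 0 = one.getD 1 0 := by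
      simpa using PySem.List.pyGetD_natCast (xs := one) (n := 1) (d := 0)
    have htake : (prices.take 1).reverse = [prices.getD 0 0] := by
      cases prices with
      | nil => simp at hk
      | cons a l => simp [List.getD]
    have hset : ∀ v : Int, PySem.List.pySetD one (0 : Int) v = v :: one.drop 1 := by
      intro v
      have he : PySem.List.pySetD one (0 : Int) v = one.set 0 v := by
        simpa using PySem.List.pySetD_natCast (xs := one) (n := 0) (v := v)
      rw [he, ← Nat.zero_add 1, ← drop_set_cons one 0 v (by omega)]
      simp
    rw [hp0, hone1, htake, refA_cons]
    by_cases hbr : m > prices.getD 0 0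
    · rw [if_pos hbr, if_pos hbr, hset]
      simp [refA]
    · rw [if_neg hbr, if_neg hbr, hset]
      simp [refA]
  | succ k ih =>
    intro one m hlen hk
    have hcons : PySem.List.pyRange ((k + 1 : Nat) : Int) (-1) (-1)
        = ((k + 1 : Nat) : Int) :: PySem.List.pyRange ((k : Nat) : Int) (-1) (-1) := by
      have h := PySem.List.pyRange_neg_one_cons (a := ((k + 1 : Nat) : Int)) (b := (-1)) (by push_cast; omega)
      rw [h]; norm_num
    rw [hcons, List.foldl_cons]
    have hk1 : k + 1 < prices.length := by omega
    have hklt : k + 1 < one.length := by omega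
    have hpk : PySem.List.pyGetD prices ((k + 1 : Nat) : Int) 0 = prices.getD (k + 1) 0 := by
      simpa using PySem.List.pyGetD_natCast (xs := prices) (n := k + 1) (d := 0)
    have honek : PySem.List.pyGetD one (((k + 1 : Nat) : Int) + 1) 0 = one.getD (k + 2) 0 := by
      have he : (((k + 1 : Nat) : Int) + 1) = ((k + 2 : Nat) : Int) := by push_cast; ring
      rw [he]
      simpa using PySem.List.pyGetD_natCast (xs := one) (n := k + 2) (d := 0)
    have hsetk : ∀ v : Int, PySem.List.pySetD one ((k + 1 : Nat) : Int) v = one.set (k + 1) v := by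
      intro v; simpa using PySem.List.pySetD_natCast (xs := one) (n := k + 1) (v := v)
    have htk : (prices.take (k + 2)).reverse = prices.getD (k + 1) 0 :: (prices.take (k + 1)).reverse := by
      have h1 : prices.take (k + 1 + 1) = prices.take (k + 1) ++ [prices[k + 1]] :=
        List.take_succ_eq_append_getElem hk1
      have h2 : prices.getD (k + 1) 0 = prices[k + 1] := List.getD_eq_getElem prices 0 hk1
      rw [show k + 2 = k + 1 + 1 from rfl, h1, h2]; simp
    have cont : ∀ (v mm : Int),
        ((PySem.List.pyRange ((k : Nat) : Int) (-1) (-1)).foldl (stepA prices) (one.set (k + 1) v, mm)).1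
          = (refA mm v ((prices.take (k + 1)).reverse)).reverse ++ (v :: one.drop (k + 2)) := by
      intro v mm
      rw [ih (one.set (k + 1) v) mm (by simpa using hlen) (by omega)]
      rw [getD_set_self one (k + 1) v hklt, drop_set_cons one (k + 1) v hklt]
    have e2 : k + 1 + 1 = k + 2 := rfl
    rw [e2, htk, refA_cons]
    simp only [stepA, hpk, honek]
    by_cases hbr : m > prices.getD (k + 1) 0
    · rw [if_pos hbr, if_pos hbr, hsetk, cont]
      simp
    · rw [if_neg hbr, if_neg hbr, hsetk, cont]
      simp

-- unfold B on a nonempty reversed list down to refA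
lemma alt_eq_ref (prices : List Int) (h : prices ≠ []) :
    computeRight_alt prices
      = (refA (prices.getLast h) 0 ((prices.take (prices.length - 1)).reverse)).reverse ++ [0] := by
  have hsplit : prices.reverse = prices.getLast h :: (prices.dropLast).reverse := by
    conv_lhs => rw [← List.dropLast_append_getLast h]
    simp
  unfold computeRight_alt
  rw [hsplit]
  simp only [List.foldl_cons]
  have hs1 : stepS (([] : List Int), (none : Option Int)) (prices.getLast h)
      = ([prices.getLast h], some (prices.getLast h)) := by simp [stepS]
  rw [hs1, foldS_spec]
  simp only [List.cons_append, List.nil_append]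
  rw [List.zip_cons_cons, List.foldl_cons]
  have hs2 : stepO (([] : List Int), (0 : Int)) (prices.getLast h, prices.getLast h) = ([0], 0) := by
    simp [stepO]
  rw [hs2, foldO_spec]
  rw [outL_zip_suffL _ _ _ le_rfl]
  rw [List.dropLast_eq_take]
  simp

-- evaluate A on a nonempty list through the match
lemma a_getLast (prices : List Int) (h : prices ≠ []) :
    PySem.List.pyGet? prices (-1) = some (prices.getLast h) := by
  simp [pysem, h, List.getLast?_eq_some_getLast]

-- ===== VERDICT (by name: the statement is the Claim_ definition above) =====
theorem computeRight_spec : Claim_equal_computeRight := by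
  intro prices _ hpre
  unfold Spec_computeRight
  unfold computeRight
  rw [a_getLast prices hpre]
  show ((PySem.List.pyRange ((prices.length : Int) - 2) (-1) (-1)).foldl (stepA prices)
      (List.replicate prices.length 0, prices.getLast hpre)).1 = computeRight_alt prices
  rcases Nat.lt_or_ge prices.length 2 with hn | hn
  · -- length 1
    match prices, hpre with
    | [p], _ =>
      have hr : PySem.List.pyRange ((([p] : List Int).length : Int) - 2) (-1) (-1) = [] :=
        PySem.List.pyRange_neg_one_eq_nil (by simp)
      rw [hr]
      simp [computeRight_alt, stepS, stepO]
    | p :: q :: t, _ => simp at hn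
  · -- length ≥ 2: use the loop invariant with k = length - 2
    have hk : prices.length - 2 + 1 < prices.length := by omega
    have hcast : ((prices.length : Int) - 2) = ((prices.length - 2 : Nat) : Int) := by
      push_cast [Nat.cast_sub (by omega : 2 ≤ prices.length)]; ring
    rw [hcast, loopA_spec prices (prices.length - 2) (List.replicate prices.length 0) _
          (by simp) hk]
    have h1 : prices.length - 2 + 1 = prices.length - 1 := by omega
    rw [h1]
    have hlt : prices.length - 1 < (List.replicate prices.length (0 : Int)).length := by
      simp; omega
    have hgetD : (List.replicate prices.length (0 : Int)).getD (prices.length - 1) 0 = 0 := by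
      rw [List.getD_eq_getElem _ _ hlt, List.getElem_replicate]
    have hdrop : (List.replicate prices.length (0 : Int)).drop (prices.length - 1) = [0] := by
      rw [List.drop_replicate, show prices.length - (prices.length - 1) = 1 by omega]
      rfl
    rw [hgetD, hdrop, alt_eq_ref prices hpre]
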